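-- pv_equiv track=rewrite | github.com/julio03-student/Project_AyD-2023 | testJulian/index.py | generar_matriz_estado_estado_P
-- ===== SOURCE A (Python) =====
-- def contador_a_respecto_b(filaA, filaB, lista):
--     contador = 0
--     for i in range(len(lista) - 1):
--         if lista[i] == filaA and lista[i + 1] == filaB:
--             contador += 1
--     return contador
--
-- def generar_matriz_estado_estado_P(estados, transiciones):
--     lista_coincidencias = []
--     for fila in range(len(estados)):
--         fila_coincidencias = []
--         fila_coincidencias.append(estados[fila])
--         for filaS in range(len(estados)):
--             fila_coincidencias.append(
--                 contador_a_respecto_b(estados[filaS], estados[fila], transiciones)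
--             )
--         lista_coincidencias.append(fila_coincidencias)
--     return lista_coincidencias
-- ===== SOURCE B (Python) =====
-- def generar_matriz_estado_estado_P(estados, transiciones):
--     pares = {}
--     for par in zip(transiciones, transiciones[1:]):
--         pares[par] = pares.get(par, 0) + 1
--     return [[b] + [pares.get((a, b), 0) for a in estados] for b in estados]
-- ===== Notes on version B (the rewrite author's own statement) =====
-- stated objective: faster
-- what changed: Instead of re-scanning the whole transition list for every (state,state) cell, B counts all consecutive pairs of transiciones once into a dict and fills the matrix with O(1) lookups.
import Mathlib
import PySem

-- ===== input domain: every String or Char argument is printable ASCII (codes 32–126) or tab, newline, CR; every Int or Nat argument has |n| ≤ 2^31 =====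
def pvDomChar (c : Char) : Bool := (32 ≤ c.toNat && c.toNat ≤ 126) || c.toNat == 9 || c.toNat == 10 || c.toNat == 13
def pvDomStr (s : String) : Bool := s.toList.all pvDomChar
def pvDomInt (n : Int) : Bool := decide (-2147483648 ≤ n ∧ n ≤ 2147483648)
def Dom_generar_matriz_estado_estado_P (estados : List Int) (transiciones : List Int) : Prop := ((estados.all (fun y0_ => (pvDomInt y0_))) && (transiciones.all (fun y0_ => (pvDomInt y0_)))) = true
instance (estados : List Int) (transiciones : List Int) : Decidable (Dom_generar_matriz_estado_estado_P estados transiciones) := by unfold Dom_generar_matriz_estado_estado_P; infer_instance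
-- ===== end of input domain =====

-- B replaces A's per-cell rescan of the transition list by a single-pass dict of consecutive-pair counts (faster, asymptotic).


-- ===== PORT A =====
def contador_a_respecto_b (filaA filaB : Int) (lista : List Int) : Int :=
  (PySem.List.pyRange 0 ((lista.length : Int) - 1) 1).foldl
    (fun contador i =>
      if PySem.List.pyGetD lista i 0 = filaA ∧ PySem.List.pyGetD lista (i + 1) 0 = filaB then
        contador + 1
      else contador) 0

def generar_matriz_estado_estado_P (estados : List Int) (transiciones : List Int) : List (List Int) :=
  (PySem.List.pyRange 0 (estados.length : Int) 1).foldl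
    (fun lista_coincidencias fila =>
      lista_coincidencias ++
        [(PySem.List.pyRange 0 (estados.length : Int) 1).foldl
          (fun fila_coincidencias filaS =>
            fila_coincidencias ++
              [contador_a_respecto_b (PySem.List.pyGetD estados filaS 0)
                (PySem.List.pyGetD estados fila 0) transiciones])
          [PySem.List.pyGetD estados fila 0]]) []

-- ===== PORT B =====
def generar_matriz_estado_estado_P_alt (estados : List Int) (transiciones : List Int) : List (List Int) :=
  let pares : PySem.Dict (Int × Int) Int :=
    (transiciones.zip transiciones.tail).foldl
      (fun d par => d.insert par (d.getD par 0 + 1)) PySem.Dict.empty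
  estados.map (fun b => b :: estados.map (fun a => pares.getD (a, b) 0))

-- ===== PRECONDITION & SPEC =====
def Spec_generar_matriz_estado_estado_P (estados : List Int) (transiciones : List Int) (out : List (List Int)) : Prop := out = generar_matriz_estado_estado_P_alt estados transiciones
instance (estados : List Int) (transiciones : List Int) (out : List (List Int)) : Decidable (Spec_generar_matriz_estado_estado_P estados transiciones out) := by unfold Spec_generar_matriz_estado_estado_P; infer_instance

-- ===== CLAIM (what is proved, stated in full; the proofs are below) =====
def Claim_equal_generar_matriz_estado_estado_P : Prop := ∀ (estados : List Int) (transiciones : List Int), Dom_generar_matriz_estado_estado_P estados transiciones → Spec_generar_matriz_estado_estado_P estados transiciones (generar_matriz_estado_estado_P estados transiciones)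

-- ===== LEMMAS AND PROOFS =====

-- The consecutive-pair list, written through indices (the form A's loop reads).
theorem zip_tail_eq_map_range (l : List Int) :
    l.zip l.tail =
      (List.range (l.length - 1)).map (fun k => (l.getD k 0, l.getD (k + 1) 0)) := by
  induction l with
  | nil => simp
  | cons x t ih =>
    cases t with
    | nil => simp
    | cons y r =>
      simp only [List.tail_cons, List.zip_cons_cons, List.length_cons,
        Nat.add_sub_cancel, List.range_succ_eq_map, List.map_cons, List.map_map]
      refine congrArg₂ List.cons rfl ?_
      have h := ih
      simp only [List.tail_cons, List.length_cons, Nat.add_sub_cancel] at h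
      rw [h]
      apply List.map_congr_left
      intro k _
      simp [Function.comp]

-- A's inner counter equals the count of the pair in the zipped list.
theorem contador_eq (a b : Int) (l : List Int) :
    contador_a_respecto_b a b l = ((l.zip l.tail).count (a, b) : Int) := by
  unfold contador_a_respecto_b
  rw [PySem.List.foldl_ite_add_one, zip_tail_eq_map_range, List.count_eq_countP,
    List.countP_map, PySem.List.pyRange_one]
  rw [List.countP_map]
  have ht : (((l.length : Int) - 1) - 0).toNat = l.length - 1 := by omega
  rw [ht, zero_add]
  congr 1
  apply List.countP_congr
  intro k _
  have hc : ((0 : Int) + (k : Int) + 1) = ((k + 1 : Nat) : Int) := by push_cast; ring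
  simp only [Function.comp, hc]
  simp only [zero_add, PySem.List.pyGetD_natCast]
  simp [Prod.ext_iff]

theorem a_eq_maps (estados transiciones : List Int) :
    generar_matriz_estado_estado_P estados transiciones =
      estados.map (fun e => e :: estados.map
        (fun a => contador_a_respecto_b a e transiciones)) := by
  unfold generar_matriz_estado_estado_P
  have key : ∀ {β : Type} (h : Int → β),
      (PySem.List.pyRange 0 (estados.length : Int)).map
          (fun j => h (PySem.List.pyGetD estados j 0)) = estados.map h := by
    intro β h
    rw [show (fun j => h (PySem.List.pyGetD estados j 0))
          = h ∘ (fun j => PySem.List.pyGetD estados j 0) from rfl,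
      ← List.map_map, PySem.List.map_pyGetD_pyRange_zero']
  have inner : ∀ e : Int,
      (PySem.List.pyRange 0 (estados.length : Int)).map
          (fun j => contador_a_respecto_b (PySem.List.pyGetD estados j 0) e transiciones)
        = estados.map (fun a => contador_a_respecto_b a e transiciones) := fun e => key (fun a => contador_a_respecto_b a e transiciones)
  simp only [PySem.List.foldl_append_singleton_eq_map, List.nil_append,
    List.singleton_append, inner]
  exact key (fun e => e :: estados.map (fun a => contador_a_respecto_b a e transiciones))

theorem b_eq_maps (estados transiciones : List Int) :
    generar_matriz_estado_estado_P_alt estados transiciones =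
      estados.map (fun e => e :: estados.map
        (fun a => ((transiciones.zip transiciones.tail).count (a, e) : Int))) := by
  unfold generar_matriz_estado_estado_P_alt
  simp only [PySem.Dict.foldl_insert_getD_add_one_eq_counter, PySem.Dict.getD_counter]

-- ===== VERDICT (by name: the statement is the Claim_ definition above) =====
theorem generar_matriz_estado_estado_P_spec : Claim_equal_generar_matriz_estado_estado_P := by
  intro estados transiciones _
  unfold Spec_generar_matriz_estado_estado_P
  rw [a_eq_maps, b_eq_maps]
  simp only [contador_eq]
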